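-- pv_equiv track=rewrite | github.com/petteriTeikari/deep-biblio-tools | scripts/deterministic_convert.py | sanitize_citation_key
-- ===== SOURCE A (Python) =====
-- def sanitize_citation_key(key: str) -> str:
--     """
--     Sanitize citation keys for LaTeX compatibility.
--
--     Removes:
--     - Control characters (like ^^?)
--     - Non-ASCII characters
--     - LaTeX special characters
--     """
--     if not key:
--         return "unknownUnknown"
--
--     # Remove control characters
--     key = "".join(char for char in key if ord(char) >= 32)
--
--     # Remove non-ASCII characters
--     key = key.encode("ascii", errors="ignore").decode("ascii")
--
--     # Remove LaTeX special characters
--     key = key.replace("$", "")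
--     key = key.replace("{", "")
--     key = key.replace("}", "")
--     key = key.replace("\\", "")
--     key = key.replace("^", "")
--     key = key.replace("_", "")
--     key = key.replace("%", "")
--     key = key.replace("#", "")
--     key = key.replace("&", "")
--     key = key.replace("~", "")
--
--     # Replace spaces with hyphens
--     key = key.replace(" ", "-")
--
--     # Ensure not empty after sanitization
--     if not key:
--         return "unknownUnknown"
--
--     return key
-- ===== SOURCE B (Python) =====
-- _SPECIALS = frozenset('${}\\^_%#&~')
--
--
-- def sanitize_citation_key(key: str) -> str:
--     """Single-pass sanitizer: keep printable ASCII chars that are not LaTeX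
--     specials, turning spaces into hyphens."""
--     if not key:
--         return "unknownUnknown"
--     out = "".join(
--         "-" if ch == " " else ch
--         for ch in key
--         if 32 <= ord(ch) < 128 and ch not in _SPECIALS
--     )
--     return out if out else "unknownUnknown"
-- ===== Notes on version B (the rewrite author's own statement) =====
-- stated objective: simpler
-- what changed: Collapses A's twelve sequential passes (control-char filter, ASCII re-encode, ten single-character replace() calls, space substitution) into one traversal: a single comprehension that keeps a char iff 32 <= ord < 128 and it is not a LaTeX special, emitting '-' for spaces.
import Mathlib
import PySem

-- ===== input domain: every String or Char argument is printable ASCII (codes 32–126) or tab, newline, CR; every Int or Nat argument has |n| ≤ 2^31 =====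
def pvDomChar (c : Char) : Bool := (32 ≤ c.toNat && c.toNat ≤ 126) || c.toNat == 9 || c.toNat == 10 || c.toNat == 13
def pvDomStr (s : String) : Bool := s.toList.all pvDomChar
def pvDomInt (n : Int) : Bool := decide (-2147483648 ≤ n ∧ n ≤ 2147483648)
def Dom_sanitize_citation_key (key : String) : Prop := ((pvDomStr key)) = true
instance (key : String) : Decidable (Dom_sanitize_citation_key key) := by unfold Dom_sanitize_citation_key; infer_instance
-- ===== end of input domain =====

-- B collapses A's twelve sequential passes into one filter+map traversal (simpler, same result).

-- ===== PORT A =====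
-- literal transliteration: control-char filter, ASCII re-encode (drops codes ≥ 128),
-- ten single-character replaces, space→hyphen replace, with the two empty guards.
def sanitize_citation_key (key : String) : String :=
  if key.toList.isEmpty then "unknownUnknown" else
  let k1 := key.toList.filter (fun c => 32 ≤ c.toNat)
  let k2 := k1.filter (fun c => c.toNat ≤ 127)        -- .encode("ascii", errors="ignore"): exact (ASCII = codes 0–127)
  let k3 := PySem.Chars.replace k2 ['$'] []
  let k4 := PySem.Chars.replace k3 ['{'] []
  let k5 := PySem.Chars.replace k4 ['}'] []
  let k6 := PySem.Chars.replace k5 ['\\'] []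
  let k7 := PySem.Chars.replace k6 ['^'] []
  let k8 := PySem.Chars.replace k7 ['_'] []
  let k9 := PySem.Chars.replace k8 ['%'] []
  let k10 := PySem.Chars.replace k9 ['#'] []
  let k11 := PySem.Chars.replace k10 ['&'] []
  let k12 := PySem.Chars.replace k11 ['~'] []
  let k13 := PySem.Chars.replace k12 [' '] ['-']
  if k13.isEmpty then "unknownUnknown" else String.ofList k13

-- ===== PORT B =====
def pvSpecials : List Char := ['$', '{', '}', '\\', '^', '_', '%', '#', '&', '~']

def sanitize_citation_key_alt (key : String) : String :=
  if key.toList.isEmpty then "unknownUnknown" else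
  let out := (key.toList.filter
      (fun c => 32 ≤ c.toNat && c.toNat < 128 && !(pvSpecials.contains c))).map
      (fun c => if c = ' ' then '-' else c)
  if out.isEmpty then "unknownUnknown" else String.ofList out

-- ===== PRECONDITION & SPEC =====
def Spec_sanitize_citation_key (key : String) (out : String) : Prop := out = sanitize_citation_key_alt key
instance (key : String) (out : String) : Decidable (Spec_sanitize_citation_key key out) := by unfold Spec_sanitize_citation_key; infer_instance

-- ===== CLAIM (what is proved, stated in full; the proofs are below) =====
def Claim_equal_sanitize_citation_key : Prop := ∀ (key : String), Dom_sanitize_citation_key key → Spec_sanitize_citation_key key (sanitize_citation_key key)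

-- ===== LEMMAS AND PROOFS =====

-- replace with a one-char pattern and empty replacement is a filter
theorem replace_go_filter (ch : Char) (fuel : Nat) (l acc : List Char)
    (h : l.length ≤ fuel) :
    PySem.Chars.replace.go [ch] [] fuel l acc
      = acc.reverse ++ l.filter (fun c => !(c == ch)) := by
  induction fuel generalizing l acc with
  | zero =>
    have : l = [] := List.length_eq_zero_iff.mp (Nat.le_zero.mp h)
    subst this
    simp [PySem.Chars.replace.go]
  | succ n ih =>
    cases l with
    | nil => simp [PySem.Chars.replace.go]
    | cons c t =>
      simp only [PySem.Chars.replace.go]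
      by_cases hc : ch = c
      · subst hc
        have hp : List.isPrefixOf [ch] (ch :: t) = true := by
          simp [List.isPrefixOf]
        simp only [hp]
        rw [ih _ _ (by simpa using Nat.le_of_succ_le_succ h)]
        simp
      · have hp : List.isPrefixOf [ch] (c :: t) = false := by
          simp [List.isPrefixOf]; exact fun hh => hc hh
        simp only [hp]
        rw [if_neg (by simp)]
        rw [ih _ _ (by simpa using Nat.le_of_succ_le_succ h)]
        simp [Ne.symm hc]

theorem replace_filter (ch : Char) (l : List Char) :
    PySem.Chars.replace l [ch] [] = l.filter (fun c => !(c == ch)) := by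
  simp only [PySem.Chars.replace, List.isEmpty_cons, Bool.false_eq_true, if_false]
  simpa using replace_go_filter ch l.length l [] le_rfl

-- replace with a one-char pattern and a one-char replacement is a map
theorem replace_go_map (a b : Char) (fuel : Nat) (l acc : List Char)
    (h : l.length ≤ fuel) :
    PySem.Chars.replace.go [a] [b] fuel l acc
      = acc.reverse ++ l.map (fun c => if c = a then b else c) := by
  induction fuel generalizing l acc with
  | zero =>
    have : l = [] := List.length_eq_zero_iff.mp (Nat.le_zero.mp h)
    subst this
    simp [PySem.Chars.replace.go]
  | succ n ih =>
    cases l with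
    | nil => simp [PySem.Chars.replace.go]
    | cons c t =>
      simp only [PySem.Chars.replace.go]
      by_cases hc : a = c
      · subst hc
        have hp : List.isPrefixOf [a] (a :: t) = true := by
          simp [List.isPrefixOf]
        simp only [hp]
        rw [ih _ _ (by simpa using Nat.le_of_succ_le_succ h)]
        simp
      · have hp : List.isPrefixOf [a] (c :: t) = false := by
          simp [List.isPrefixOf]; exact fun hh => hc hh
        simp only [hp]
        rw [if_neg (by simp)]
        rw [ih _ _ (by simpa using Nat.le_of_succ_le_succ h)]
        simp [Ne.symm hc]

theorem replace_map (a b : Char) (l : List Char) :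
    PySem.Chars.replace l [a] [b] = l.map (fun c => if c = a then b else c) := by
  simp only [PySem.Chars.replace, List.isEmpty_cons, Bool.false_eq_true, if_false]
  simpa using replace_go_map a b l.length l [] le_rfl

-- the two middle sections compute the same list of chars
theorem middle_eq (l : List Char) :
    PySem.Chars.replace
      (PySem.Chars.replace (PySem.Chars.replace (PySem.Chars.replace
        (PySem.Chars.replace (PySem.Chars.replace (PySem.Chars.replace
          (PySem.Chars.replace (PySem.Chars.replace (PySem.Chars.replace
            ((l.filter (fun c => 32 ≤ c.toNat)).filter (fun c => c.toNat ≤ 127))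
            ['$'] []) ['{'] []) ['}'] []) ['\\'] []) ['^'] []) ['_'] [])
        ['%'] []) ['#'] []) ['&'] []) ['~'] []
    = (l.filter
        (fun c => 32 ≤ c.toNat && c.toNat < 128 && !(pvSpecials.contains c))) := by
  simp only [replace_filter, List.filter_filter]
  apply List.filter_congr
  intro c _
  simp only [pvSpecials, List.contains_cons, List.contains_nil, Bool.or_false, Bool.not_or]
  by_cases h32 : 32 ≤ c.toNat
  · by_cases h127 : c.toNat ≤ 127
    · have h128 : c.toNat < 128 := by omega
      simp only [h32, h127, h128, decide_true, Bool.and_true, Bool.true_and]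
      ac_rfl
    · have h128 : ¬ c.toNat < 128 := by omega
      simp [h127, h128]
  · simp [h32]

theorem sanitize_eq (key : String) :
    sanitize_citation_key key = sanitize_citation_key_alt key := by
  unfold sanitize_citation_key sanitize_citation_key_alt
  by_cases h : key.toList.isEmpty
  · simp [h]
  · simp only [h, Bool.false_eq_true, if_false]
    rw [replace_map, middle_eq]

-- ===== VERDICT (by name: the statement is the Claim_ definition above) =====
theorem sanitize_citation_key_spec : Claim_equal_sanitize_citation_key := by
  intro key _
  unfold Spec_sanitize_citation_key
  exact sanitize_eq key
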